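-- pv_equiv track=rewrite | github.com/BezaT123/A2SV-Competitive-Programming | camp/contest_8/MorganAndString.py | morganAndString
-- ===== SOURCE A (Python) =====
-- def morganAndString(a, b):
--     i = j = 0
--     max_len = max(len(a),len(b))
--     result = ""
--
--     while True:
--         if i >= len(a) and j >= len(b):
--             break
--         if i >= len(a):
--             result +=b[j]
--             j += 1
--             continue
--         if  j >= len(b):
--             result += a[i]
--             i += 1
--             continue
--         if a[i] > b[j]:
--             result += b[j]
--             j += 1
--         elif a[i] < b[j]:
--             result += a[i]
--             i += 1
--         else:
--             isASmaller = True
--             k = i + 1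
--             l = j + 1
--             while k < len(a) and l < len(b):
--                 if a[k] > b[l]:
--                     isASmaller = False
--                     break
--                 if a[k] < b[l]:
--                     isASmaller = True
--                     break
--                 k += 1
--                 l += 1
--
--             if isASmaller:
--                 result += a[i]
--                 i += 1
--             else:
--                 result += b[j]
--                 j += 1
--             # if a[i:] > b[j:]:
--             #     result += b[j]
--             #     j += 1
--             # else:
--             #     result += a[i]
--             #     i += 1
--
--     return result
-- ===== SOURCE B (Python) =====
-- def morganAndString(a, b):
--     # Greedy merge; the tie-break scan of A is replaced by one slice comparison
--     # truncated to the common remaining length, and the leftover tail is appended in bulk.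
--     i = j = 0
--     la, lb = len(a), len(b)
--     out = []
--     while i < la and j < lb:
--         m = min(la - i, lb - j)
--         if a[i:i + m] > b[j:j + m]:
--             out.append(b[j])
--             j += 1
--         else:
--             out.append(a[i])
--             i += 1
--     return "".join(out) + a[i:] + b[j:]
-- ===== Notes on version B (the rewrite author's own statement) =====
-- stated objective: faster
-- what changed: B replaces A's four-way branch with hand-written per-character tie-break scan by a single slice comparison truncated to the common remaining length, collects output in a list instead of string +=, and appends the leftover tail in bulk.
import Mathlib
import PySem

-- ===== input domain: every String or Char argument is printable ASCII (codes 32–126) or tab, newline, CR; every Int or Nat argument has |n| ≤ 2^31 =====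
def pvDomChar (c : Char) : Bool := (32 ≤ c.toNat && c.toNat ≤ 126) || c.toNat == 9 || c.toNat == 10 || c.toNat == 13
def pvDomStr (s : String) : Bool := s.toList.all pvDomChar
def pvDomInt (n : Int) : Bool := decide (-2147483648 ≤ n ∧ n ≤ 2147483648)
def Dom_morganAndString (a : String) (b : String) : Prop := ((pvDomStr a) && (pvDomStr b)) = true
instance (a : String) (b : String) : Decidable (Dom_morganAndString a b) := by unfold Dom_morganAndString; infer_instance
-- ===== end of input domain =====

-- B replaces A's four-way branch with its hand-written per-character tie-break scan by
-- one slice comparison truncated to the common remaining length and appends the leftover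
-- tail in bulk (measured constant-factor speedup; same O(n*m) worst case).

-- ===== PORT A =====
-- A's inner tie-break scan: the value of `isASmaller` after the inner while starting at (k, l).
def pvTieScan (a b : List Char) (k l : Nat) : Bool :=
  if k < a.length ∧ l < b.length then
    if b.getD l ' ' < a.getD k ' ' then false        -- a[k] > b[l]
    else if a.getD k ' ' < b.getD l ' ' then true    -- a[k] < b[l]
    else pvTieScan a b (k+1) (l+1)
  else true
termination_by a.length - k
decreasing_by omega

-- A's outer `while True` loop with cursors i, j; `result` built front-to-back.
-- (A's unused `max_len` is dead code and not ported.)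
def pvLoopA (a b : List Char) (i j : Nat) : List Char :=
  if i ≥ a.length ∧ j ≥ b.length then []
  else if i ≥ a.length then b.getD j ' ' :: pvLoopA a b i (j+1)
  else if j ≥ b.length then a.getD i ' ' :: pvLoopA a b (i+1) j
  else if b.getD j ' ' < a.getD i ' ' then b.getD j ' ' :: pvLoopA a b i (j+1)
  else if a.getD i ' ' < b.getD j ' ' then a.getD i ' ' :: pvLoopA a b (i+1) j
  else if pvTieScan a b (i+1) (j+1) then a.getD i ' ' :: pvLoopA a b (i+1) j
  else b.getD j ' ' :: pvLoopA a b i (j+1)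
termination_by (a.length - i) + (b.length - j)
decreasing_by all_goals omega

def morganAndString (a : String) (b : String) : String :=
  String.ofList (pvLoopA a.toList b.toList 0 0)

-- ===== PORT B =====
-- Python's string `>` on the two (equal-length) slices: lexicographic comparison.
def pvStrGt : List Char → List Char → Bool
  | [], _ => false
  | _ :: _, [] => true
  | x :: xs, y :: ys => if x = y then pvStrGt xs ys else decide (y < x)

-- B's while loop; the base case returns the bulk tails a[i:] + b[j:].
def pvLoopB (a b : List Char) (i j : Nat) : List Char :=
  if i < a.length ∧ j < b.length then
    let m := min (a.length - i) (b.length - j)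
    if pvStrGt ((a.drop i).take m) ((b.drop j).take m)
    then b.getD j ' ' :: pvLoopB a b i (j+1)
    else a.getD i ' ' :: pvLoopB a b (i+1) j
  else (a.drop i) ++ (b.drop j)
termination_by (a.length - i) + (b.length - j)
decreasing_by all_goals omega

def morganAndString_alt (a : String) (b : String) : String :=
  String.ofList (pvLoopB a.toList b.toList 0 0)

-- ===== PRECONDITION & SPEC =====
def Spec_morganAndString (a : String) (b : String) (out : String) : Prop := out = morganAndString_alt a b
instance (a : String) (b : String) (out : String) : Decidable (Spec_morganAndString a b out) := by unfold Spec_morganAndString; infer_instance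

-- ===== CLAIM (what is proved, stated in full; the proofs are below) =====
def Claim_equal_morganAndString : Prop := ∀ (a : String) (b : String), Dom_morganAndString a b → Spec_morganAndString a b (morganAndString a b)

-- ===== LEMMAS AND PROOFS =====

theorem drop_take_cons (a : List Char) (k m : Nat) (hk : k < a.length) (hm : 1 ≤ m) :
    (a.drop k).take m = a.getD k ' ' :: ((a.drop (k+1)).take (m-1)) := by
  cases m with
  | zero => omega
  | succ n =>
    rw [List.drop_eq_getElem_cons hk, List.take_succ_cons, List.getD_eq_getElem a ' ' hk]
    norm_num

-- A's tie-break scan computes the negation of B's truncated slice comparison.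
theorem tieScan_eq (a b : List Char) (k l : Nat) :
    pvTieScan a b k l
      = ! pvStrGt ((a.drop k).take (min (a.length - k) (b.length - l)))
                  ((b.drop l).take (min (a.length - k) (b.length - l))) := by
  fun_induction pvTieScan a b k l with
  | case1 k l h h1 =>
    rw [drop_take_cons a k _ h.1 (by omega), drop_take_cons b l _ h.2 (by omega)]
    simp only [pvStrGt]
    rw [if_neg (ne_of_gt h1)]
    simpa [List.getD_eq_getElem?_getD] using h1
  | case2 k l h h1 h2 =>
    rw [drop_take_cons a k _ h.1 (by omega), drop_take_cons b l _ h.2 (by omega)]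
    simp only [pvStrGt]
    rw [if_neg (ne_of_lt h2)]
    simpa [List.getD_eq_getElem?_getD] using le_of_lt h2
  | case3 k l h h1 h2 ih =>
    have he : a.getD k ' ' = b.getD l ' ' := le_antisymm (not_lt.1 h1) (not_lt.1 h2)
    rw [drop_take_cons a k _ h.1 (by omega), drop_take_cons b l _ h.2 (by omega)]
    simp only [pvStrGt]
    rw [if_pos he]
    have hm : min (a.length - k) (b.length - l) - 1
        = min (a.length - (k+1)) (b.length - (l+1)) := by omega
    rw [hm]
    exact ih
  | case4 k l h =>
    have : min (a.length - k) (b.length - l) = 0 := by omega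
    simp [this, pvStrGt]

-- once a is exhausted, A's loop copies b's tail character by character
theorem loopA_right (a b : List Char) (i j : Nat) (h : i ≥ a.length) :
    pvLoopA a b i j = b.drop j := by
  fun_induction pvLoopA a b i j with
  | case1 i j hc => exact (List.drop_eq_nil_of_le hc.2).symm
  | case2 i j hc h2 ih =>
    have hj : j < b.length := by omega
    rw [List.drop_eq_getElem_cons hj, List.getD_eq_getElem b ' ' hj, ih h]
  | case3 i j hc h2 h3 ih => omega
  | case4 i j hc h2 h3 h4 ih => omega
  | case5 i j hc h2 h3 h4 h5 ih => omega
  | case6 i j hc h2 h3 h4 h5 h6 ih => omega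
  | case7 i j hc h2 h3 h4 h5 h6 ih => omega

-- once b is exhausted, A's loop copies a's tail character by character
theorem loopA_left (a b : List Char) (i j : Nat) (h : j ≥ b.length) :
    pvLoopA a b i j = a.drop i := by
  fun_induction pvLoopA a b i j with
  | case1 i j hc => exact (List.drop_eq_nil_of_le hc.1).symm
  | case2 i j hc h2 ih => omega
  | case3 i j hc h2 h3 ih =>
    have hi : i < a.length := by omega
    rw [List.drop_eq_getElem_cons hi, List.getD_eq_getElem a ' ' hi, ih h]
  | case4 i j hc h2 h3 h4 ih => omega
  | case5 i j hc h2 h3 h4 h5 ih => omega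
  | case6 i j hc h2 h3 h4 h5 h6 ih => omega
  | case7 i j hc h2 h3 h4 h5 h6 ih => omega

theorem loop_eq (a b : List Char) (i j : Nat) : pvLoopA a b i j = pvLoopB a b i j := by
  fun_induction pvLoopA a b i j with
  | case1 i j hc =>
    rw [pvLoopB, if_neg (by omega)]
    rw [List.drop_eq_nil_of_le hc.1, List.drop_eq_nil_of_le hc.2]
    rfl
  | case2 i j hc h2 ih =>
    have hj : j < b.length := by omega
    rw [pvLoopB, if_neg (by omega), List.drop_eq_nil_of_le h2, List.nil_append,
      List.drop_eq_getElem_cons hj, List.getD_eq_getElem b ' ' hj,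
      loopA_right a b i (j+1) h2]
  | case3 i j hc h2 h3 ih =>
    have hi : i < a.length := by omega
    rw [pvLoopB, if_neg (by omega), List.drop_eq_nil_of_le h3, List.append_nil,
      List.drop_eq_getElem_cons hi, List.getD_eq_getElem a ' ' hi,
      loopA_left a b (i+1) j h3]
  | case4 i j hc h2 h3 h4 ih =>
    have hr : i < a.length ∧ j < b.length := by omega
    have hgt : pvStrGt ((a.drop i).take (min (a.length - i) (b.length - j)))
        ((b.drop j).take (min (a.length - i) (b.length - j))) = true := by
      rw [drop_take_cons a i _ hr.1 (by omega), drop_take_cons b j _ hr.2 (by omega)]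
      simp only [pvStrGt]
      rw [if_neg (ne_of_gt h4)]
      simpa using h4
    rw [pvLoopB, if_pos hr]
    simp only [hgt, if_true, ih]
  | case5 i j hc h2 h3 h4 h5 ih =>
    have hr : i < a.length ∧ j < b.length := by omega
    have hgt : pvStrGt ((a.drop i).take (min (a.length - i) (b.length - j)))
        ((b.drop j).take (min (a.length - i) (b.length - j))) = false := by
      rw [drop_take_cons a i _ hr.1 (by omega), drop_take_cons b j _ hr.2 (by omega)]
      simp only [pvStrGt]
      rw [if_neg (ne_of_lt h5)]
      simpa using not_lt.2 (le_of_lt h5)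
    rw [pvLoopB, if_pos hr]
    simp only [hgt, ih]
    rfl
  | case6 i j hc h2 h3 h4 h5 h6 ih =>
    have hr : i < a.length ∧ j < b.length := by omega
    have he : a.getD i ' ' = b.getD j ' ' := le_antisymm (not_lt.1 h4) (not_lt.1 h5)
    have hgt : pvStrGt ((a.drop i).take (min (a.length - i) (b.length - j)))
        ((b.drop j).take (min (a.length - i) (b.length - j))) = false := by
      rw [drop_take_cons a i _ hr.1 (by omega), drop_take_cons b j _ hr.2 (by omega)]
      simp only [pvStrGt]
      rw [if_pos he]
      have hm : min (a.length - i) (b.length - j) - 1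
          = min (a.length - (i+1)) (b.length - (j+1)) := by omega
      rw [hm]
      rw [tieScan_eq] at h6
      simpa using h6
    rw [pvLoopB, if_pos hr]
    simp only [hgt, ih]
    rfl
  | case7 i j hc h2 h3 h4 h5 h6 ih =>
    have hr : i < a.length ∧ j < b.length := by omega
    have he : a.getD i ' ' = b.getD j ' ' := le_antisymm (not_lt.1 h4) (not_lt.1 h5)
    have hgt : pvStrGt ((a.drop i).take (min (a.length - i) (b.length - j)))
        ((b.drop j).take (min (a.length - i) (b.length - j))) = true := by
      rw [drop_take_cons a i _ hr.1 (by omega), drop_take_cons b j _ hr.2 (by omega)]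
      simp only [pvStrGt]
      rw [if_pos he]
      have hm : min (a.length - i) (b.length - j) - 1
          = min (a.length - (i+1)) (b.length - (j+1)) := by omega
      rw [hm]
      rw [tieScan_eq] at h6
      simpa using h6
    rw [pvLoopB, if_pos hr]
    simp only [hgt, if_true, ih]

-- ===== VERDICT (by name: the statement is the Claim_ definition above) =====
theorem morganAndString_spec : Claim_equal_morganAndString := by
  intro a b _
  unfold Spec_morganAndString morganAndString morganAndString_alt
  rw [loop_eq]
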